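-- pv_equiv track=rewrite | github.com/rbogast/blessed-rl | game/worldgen/maze_generator.py | _is_adjacent_to_stair
-- ===== SOURCE A (Python) =====
-- from typing import List, Set, Tuple, Optional
--
-- def _is_adjacent_to_stair(x: int, y: int, stair_positions: Set[Tuple[int, int]]) -> bool:
--     """
--     Check if a position is adjacent to any stair.
--
--     Args:
--         x, y: Position to check
--         stair_positions: Set of stair coordinates
--
--     Returns:
--         True if adjacent to a stair, False otherwise
--     """
--     # Check all 8 adjacent positions (including diagonals for safety)
--     for dx in [-1, 0, 1]:
--         for dy in [-1, 0, 1]: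
--             if dx == 0 and dy == 0:
--                 continue  # Skip the center position
--
--             check_pos = (x + dx, y + dy)
--             if check_pos in stair_positions:
--                 return True
--
--     return False
-- ===== SOURCE B (Python) =====
-- def _is_adjacent_to_stair(x, y, stair_positions):
--     """Check if a position is adjacent to any stair (Chebyshev distance exactly 1)."""
--     return any(max(abs(sx - x), abs(sy - y)) == 1 for (sx, sy) in stair_positions)
-- ===== Notes on version B (the rewrite author's own statement) =====
-- stated objective: alternative
-- what changed: B drops the 8-neighbor offset scan with set membership probes and instead iterates the stair positions once, testing Chebyshev distance exactly 1 from (x,y).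
import Mathlib
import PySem

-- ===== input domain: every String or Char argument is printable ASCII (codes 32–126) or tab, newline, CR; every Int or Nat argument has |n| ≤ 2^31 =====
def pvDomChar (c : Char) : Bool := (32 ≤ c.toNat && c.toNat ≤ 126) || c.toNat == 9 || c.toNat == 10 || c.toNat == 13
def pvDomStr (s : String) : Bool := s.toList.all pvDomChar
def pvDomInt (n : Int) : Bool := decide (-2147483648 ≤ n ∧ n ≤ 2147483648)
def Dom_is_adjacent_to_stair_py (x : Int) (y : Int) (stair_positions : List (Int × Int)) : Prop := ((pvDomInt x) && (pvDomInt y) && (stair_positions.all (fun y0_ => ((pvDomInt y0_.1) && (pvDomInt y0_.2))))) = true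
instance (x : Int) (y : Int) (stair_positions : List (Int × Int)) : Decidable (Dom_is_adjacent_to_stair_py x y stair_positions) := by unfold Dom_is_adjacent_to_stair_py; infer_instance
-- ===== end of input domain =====

-- ===== PORT A =====
-- Port of A: scan the 8 neighbor offsets and probe the stair set (early return via `any`).
def is_adjacent_to_stair_py (x : Int) (y : Int) (stair_positions : List (Int × Int)) : Bool :=
  [(-1 : Int), 0, 1].any (fun dx =>
    [(-1 : Int), 0, 1].any (fun dy =>
      if dx = 0 ∧ dy = 0 then false  -- continue: skip the center
      else stair_positions.contains (x + dx, y + dy)))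

-- ===== PORT B =====
-- Port of B: iterate the stairs, test Chebyshev distance exactly 1 from (x, y).
def is_adjacent_to_stair_py_alt (x : Int) (y : Int) (stair_positions : List (Int × Int)) : Bool :=
  stair_positions.any (fun p => max (p.1 - x).natAbs (p.2 - y).natAbs == 1)

-- ===== PRECONDITION & SPEC =====
def Spec_is_adjacent_to_stair_py (x : Int) (y : Int) (stair_positions : List (Int × Int)) (out : Bool) : Prop := out = is_adjacent_to_stair_py_alt x y stair_positions
instance (x : Int) (y : Int) (stair_positions : List (Int × Int)) (out : Bool) : Decidable (Spec_is_adjacent_to_stair_py x y stair_positions out) := by unfold Spec_is_adjacent_to_stair_py; infer_instance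

-- ===== CLAIM (what is proved, stated in full; the proofs are below) =====
def Claim_equal_is_adjacent_to_stair_py : Prop := ∀ (x : Int) (y : Int) (stair_positions : List (Int × Int)), Dom_is_adjacent_to_stair_py x y stair_positions → Spec_is_adjacent_to_stair_py x y stair_positions (is_adjacent_to_stair_py x y stair_positions)

-- ===== LEMMAS AND PROOFS =====

-- ===== VERDICT (by name: the statement is the Claim_ definition above) =====
theorem is_adjacent_to_stair_py_spec : Claim_equal_is_adjacent_to_stair_py := by
  intro x y sp _
  unfold Spec_is_adjacent_to_stair_py is_adjacent_to_stair_py is_adjacent_to_stair_py_alt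
  simp only [List.any_eq, List.contains_eq_mem, decide_eq_true_eq, beq_iff_eq,
    decide_eq_decide]
  constructor
  · rintro ⟨dx, hdx, dy, hdy, h⟩
    split_ifs at h with h0
    simp only [List.mem_cons, List.not_mem_nil, or_false] at hdx hdy
    refine ⟨(x + dx, y + dy), of_decide_eq_true h, ?_⟩
    show max (x + dx - x).natAbs (y + dy - y).natAbs = 1
    omega
  · rintro ⟨⟨sx, sy⟩, hmem, hd⟩
    refine ⟨sx - x, ?_, sy - y, ?_, ?_⟩
    · simp only [List.mem_cons, List.not_mem_nil, or_false]; omega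
    · simp only [List.mem_cons, List.not_mem_nil, or_false]; omega
    · rw [if_neg (by omega)]
      have hp : (x + (sx - x), y + (sy - y)) = (sx, sy) := by simp
      rw [hp]
      exact decide_eq_true hmem
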